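-- pv_equiv track=rewrite | github.com/mauhirt/bond-screenshots | verify_bbid_cusip_relationship.py | cusip_check_digit
-- ===== SOURCE A (Python) =====
-- def cusip_check_digit(base8):
--     """Compute CUSIP check digit for an 8-character base."""
--     values = []
--     for ch in base8:
--         if ch.isdigit():
--             values.append(int(ch))
--         elif ch.isalpha():
--             values.append(ord(ch.upper()) - ord('A') + 10)
--         elif ch == '*':
--             values.append(36)
--         elif ch == '@':
--             values.append(37)
--         elif ch == '#':
--             values.append(38)
--         else:
--             values.append(0)
--
--     total = 0
--     for i, v in enumerate(values):
--         if i % 2 == 1:  # Double odd positions (0-indexed)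
--             v *= 2
--         total += v // 10 + v % 10
--
--     return str((10 - (total % 10)) % 10)
-- ===== SOURCE B (Python) =====
-- _TABLE = "0123456789ABCDEFGHIJKLMNOPQRSTUVWXYZ*@#"
--
-- # Per-character checksum contributions, precomputed once: EVEN[c] is the
-- # digit-sum of c's CUSIP value, ODD[c] the digit-sum of its doubled value.
-- EVEN = {}
-- ODD = {}
-- for _i, _c in enumerate(_TABLE):
--     for _k in (_c, _c.lower()):
--         EVEN[_k] = _i // 10 + _i % 10
--         ODD[_k] = (2 * _i) // 10 + (2 * _i) % 10
--
--
-- def cusip_check_digit(base8):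
--     """Compute CUSIP check digit for an 8-character base."""
--     total = 0
--     i = 0
--     n = len(base8)
--     while i + 1 < n:
--         total += EVEN.get(base8[i], 0) + ODD.get(base8[i + 1], 0)
--         i += 2
--     if i < n:
--         total += EVEN.get(base8[i], 0)
--     return str((10 - total % 10) % 10)
-- ===== Notes on version B (the rewrite author's own statement) =====
-- stated objective: alternative
-- what changed: Replaces A's branch-chain value list plus enumerate pass with parity test, doubling and per-element divmod by two contribution tables precomputed once (digit-sums of the value and of its doubled value, keyed directly by character) and a stride-2 loop that consumes the string two characters at a time with plain dict lookups.
import Mathlib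
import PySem

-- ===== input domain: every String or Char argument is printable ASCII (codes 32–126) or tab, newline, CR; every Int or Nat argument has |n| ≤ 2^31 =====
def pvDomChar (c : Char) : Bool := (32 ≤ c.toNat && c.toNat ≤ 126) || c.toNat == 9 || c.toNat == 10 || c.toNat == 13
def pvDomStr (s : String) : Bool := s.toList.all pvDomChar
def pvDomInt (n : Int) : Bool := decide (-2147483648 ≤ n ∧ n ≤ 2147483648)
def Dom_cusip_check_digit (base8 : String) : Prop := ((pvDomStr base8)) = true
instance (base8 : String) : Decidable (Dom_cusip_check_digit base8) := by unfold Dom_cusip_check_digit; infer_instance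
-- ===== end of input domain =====

-- B replaces A's branch-chain value list + enumerate pass (parity test, doubling,
-- per-element divmod) with two precomputed per-character contribution tables and a
-- stride-2 loop consuming two characters per step; objective: alternative.

-- ===== PORT A =====
-- per-character value, A's if/elif chain in order
-- (int(ch) on a single digit character equals ord(ch) - 48; exact on the digit branch)
def pvAVal (ch : Char) : Int :=
  if PySem.Chars.isdigit ch then (ch.toNat : Int) - 48
  else if PySem.Chars.isalpha ch then ((PySem.Chars.upperChar ch).toNat : Int) - 65 + 10
  else if ch = '*' then 36
  else if ch = '@' then 37
  else if ch = '#' then 38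
  else 0

-- the second loop's body: total += v // 10 + v % 10 with v doubled at odd i
def pvAStep (total : Int) (p : Int × Int) : Int :=
  let v := if PySem.Int.mod p.1 2 = 1 then p.2 * 2 else p.2
  total + PySem.Int.floordiv v 10 + PySem.Int.mod v 10

def cusip_check_digit (base8 : String) : String :=
  let values := base8.toList.foldl (fun acc ch => acc ++ [pvAVal ch]) []
  let total := (PySem.List.enumerate values 0).foldl pvAStep 0
  PySem.Int.toStr (PySem.Int.mod (10 - PySem.Int.mod total 10) 10)

-- ===== PORT B =====
def pvTableB : List Char := "0123456789ABCDEFGHIJKLMNOPQRSTUVWXYZ*@#".toList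

-- module-level construction of the two contribution dicts EVEN and ODD
def pvDicts : PySem.Dict Char Int × PySem.Dict Char Int :=
  (PySem.List.enumerate pvTableB 0).foldl
    (fun d p =>
      [p.2, PySem.Chars.lowerChar p.2].foldl
        (fun d k =>
          (d.1.insert k (PySem.Int.floordiv p.1 10 + PySem.Int.mod p.1 10),
           d.2.insert k (PySem.Int.floordiv (2 * p.1) 10 + PySem.Int.mod (2 * p.1) 10)))
        d)
    (PySem.Dict.empty, PySem.Dict.empty)

def pvEVEN : PySem.Dict Char Int := pvDicts.1
def pvODD : PySem.Dict Char Int := pvDicts.2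

-- B's while loop: consumes the string two characters per step (i, i+1), then a
-- possible trailing character
def pvBLoop : List Char → Int → Int
  | [], total => total
  | [c], total => total + pvEVEN.getD c 0
  | a :: b :: rest, total => pvBLoop rest (total + (pvEVEN.getD a 0 + pvODD.getD b 0))

def cusip_check_digit_alt (base8 : String) : String :=
  let total := pvBLoop base8.toList 0
  PySem.Int.toStr (PySem.Int.mod (10 - PySem.Int.mod total 10) 10)

-- ===== PRECONDITION & SPEC =====
def Spec_cusip_check_digit (base8 : String) (out : String) : Prop := out = cusip_check_digit_alt base8
instance (base8 : String) (out : String) : Decidable (Spec_cusip_check_digit base8 out) := by unfold Spec_cusip_check_digit; infer_instance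

-- ===== CLAIM (what is proved, stated in full; the proofs are below) =====
def Claim_equal_cusip_check_digit : Prop := ∀ (base8 : String), Dom_cusip_check_digit base8 → Spec_cusip_check_digit base8 (cusip_check_digit base8)

-- ===== LEMMAS AND PROOFS =====

-- digit sum v // 10 + v % 10
def pvDS (v : Int) : Int := PySem.Int.floordiv v 10 + PySem.Int.mod v 10

-- the checksum of a value list, two elements at a time (second one doubled)
def pvS : List Int → Int
  | [] => 0
  | [a] => pvDS a
  | a :: b :: r => pvDS a + pvDS (2 * b) + pvS r

-- the table dicts give exactly the digit sums of A's per-character values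
set_option maxRecDepth 40000 in
set_option maxHeartbeats 2000000 in
theorem pvDict_eq_ofNat : ∀ n : Nat, n < 127 →
    pvEVEN.getD (Char.ofNat n) 0 = pvDS (pvAVal (Char.ofNat n)) ∧
    pvODD.getD (Char.ofNat n) 0 = pvDS (2 * pvAVal (Char.ofNat n)) := by
  decide

theorem pvDict_eq (c : Char) (h : pvDomChar c = true) :
    pvEVEN.getD c 0 = pvDS (pvAVal c) ∧ pvODD.getD c 0 = pvDS (2 * pvAVal c) := by
  have hlt : c.toNat < 127 := by
    simp only [pvDomChar, Bool.or_eq_true, Bool.and_eq_true, decide_eq_true_eq,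
      beq_iff_eq] at h
    omega
  have := pvDict_eq_ofNat c.toNat hlt
  rwa [Char.ofNat_toNat] at this

-- A's first loop builds exactly the map of pvAVal
theorem pvValues_eq (xs : List Char) (acc : List Int) :
    xs.foldl (fun acc ch => acc ++ [pvAVal ch]) acc = acc ++ xs.map pvAVal := by
  induction xs generalizing acc with
  | nil => simp
  | cons c cs ih => simp [ih]

theorem pvMod_two_even (m : Int) : PySem.Int.mod (2 * m) 2 = 0 := by
  simp [PySem.Int.mod]

theorem pvMod_two_odd (m : Int) : PySem.Int.mod (2 * m + 1) 2 = 1 := by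
  simp [PySem.Int.mod]

-- A's enumerate fold, started at any even index, computes pvS
theorem pvAFold_eq (xs : List Int) : ∀ (t : Int) (m : Int),
    (PySem.List.enumerate xs (2 * m)).foldl pvAStep t = t + pvS xs := by
  induction xs using pvS.induct with
  | case1 => intro t m; simp [PySem.List.enumerate_nil, pvS]
  | case2 a =>
    intro t m
    simp only [PySem.List.enumerate_cons, PySem.List.enumerate_nil, List.foldl_cons,
      List.foldl_nil, pvAStep, pvS, pvDS, pvMod_two_even m, if_neg (by norm_num : ¬ (0:Int) = 1)]
    ring
  | case3 a b r ih =>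
    intro t m
    rw [PySem.List.enumerate_cons, PySem.List.enumerate_cons]
    have h2 : (2 * m + 1 + 1 : Int) = 2 * (m + 1) := by ring
    rw [List.foldl_cons, List.foldl_cons, h2, ih _ (m + 1)]
    simp only [pvAStep, pvS, pvDS, pvMod_two_even m, pvMod_two_odd m,
      if_neg (by norm_num : ¬ (0:Int) = 1), if_true]
    ring_nf

-- B's stride-2 loop computes pvS of the mapped values, on in-domain characters
theorem pvBLoop_eq (xs : List Char) (t : Int) :
    (∀ c ∈ xs, pvDomChar c = true) → pvBLoop xs t = t + pvS (xs.map pvAVal) := by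
  induction xs, t using pvBLoop.induct with
  | case1 t => intro _; simp [pvBLoop, pvS]
  | case2 c t => intro h; simp [pvBLoop, pvS, (pvDict_eq c (h c (by simp))).1]
  | case3 a b rest t ih =>
    intro h
    rw [pvBLoop, ih (fun c hc => h c (by simp [hc]))]
    simp only [List.map_cons, pvS, (pvDict_eq a (h a (by simp))).1,
      (pvDict_eq b (h b (by simp))).2]
    ring

-- ===== VERDICT (by name: the statement is the Claim_ definition above) =====
theorem cusip_check_digit_spec : Claim_equal_cusip_check_digit := by
  intro base8 hdom
  unfold Spec_cusip_check_digit cusip_check_digit cusip_check_digit_alt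
  have hall : ∀ c ∈ base8.toList, pvDomChar c = true := by
    intro c hc
    have := hdom
    unfold Dom_cusip_check_digit pvDomStr at this
    exact List.all_eq_true.mp this c hc
  have hA := pvAFold_eq (base8.toList.map pvAVal) 0 0
  norm_num at hA
  simp only [pvValues_eq, List.nil_append, hA, pvBLoop_eq base8.toList 0 hall]
  norm_num
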